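-- pv_equiv track=rewrite | github.com/Welliluiz/Fas-Disasm | fasdisasm_min.py | split_top_level_tokens
-- ===== SOURCE A (Python) =====
-- def split_top_level_tokens(text: str) -> list[str]:
--     tokens: list[str] = []
--     current: list[str] = []
--     depth = 0
--     in_string = False
--     escape = False
--
--     for char in text:
--         if in_string:
--             current.append(char)
--             if escape:
--                 escape = False
--             elif char == "\\":
--                 escape = True
--             elif char == '"':
--                 in_string = False
--             continue
--
--         if char == '"':
--             in_string = True
--             current.append(char)
--             continue
--         if char == "(":
--             depth += 1
--             current.append(char)
--             continue
--         if char == ")":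
--             depth -= 1
--             current.append(char)
--             continue
--         if char.isspace() and depth == 0:
--             if current:
--                 tokens.append("".join(current).strip())
--                 current = []
--             continue
--         current.append(char)
--
--     if current:
--         tokens.append("".join(current).strip())
--     return [token for token in tokens if token]
-- ===== SOURCE B (Python) =====
-- def split_top_level_tokens(text: str) -> list[str]:
--     tokens: list[str] = []
--     n = len(text)
--     i = 0
--     depth = 0
--     while i < n:
--         if depth == 0 and text[i].isspace():
--             i += 1
--             continue
--         buf: list[str] = []
--         while i < n:
--             c = text[i]
--             if c == '"':
--                 buf.append(c)
--                 i += 1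
--                 esc = False
--                 while i < n:
--                     ch = text[i]
--                     buf.append(ch)
--                     i += 1
--                     if esc:
--                         esc = False
--                     elif ch == "\\":
--                         esc = True
--                     elif ch == '"':
--                         break
--                 continue
--             if c == "(":
--                 depth += 1
--             elif c == ")":
--                 depth -= 1
--             elif c.isspace() and depth == 0:
--                 i += 1
--                 break
--             buf.append(c)
--             i += 1
--         tok = "".join(buf).strip()
--         if tok:
--             tokens.append(tok)
--     return tokens
-- ===== Notes on version B (the rewrite author's own statement) =====
-- stated objective: alternative
-- what changed: A is a single for-loop state machine carrying in_string/escape boolean flags and a shared accumulator across all characters; B is an index-based outer loop that skips top-level whitespace, builds one token with an inner loop, and consumes each quoted string with a dedicated innermost escape-tracking loop, so the flags disappear from the token loop.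
import Mathlib
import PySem

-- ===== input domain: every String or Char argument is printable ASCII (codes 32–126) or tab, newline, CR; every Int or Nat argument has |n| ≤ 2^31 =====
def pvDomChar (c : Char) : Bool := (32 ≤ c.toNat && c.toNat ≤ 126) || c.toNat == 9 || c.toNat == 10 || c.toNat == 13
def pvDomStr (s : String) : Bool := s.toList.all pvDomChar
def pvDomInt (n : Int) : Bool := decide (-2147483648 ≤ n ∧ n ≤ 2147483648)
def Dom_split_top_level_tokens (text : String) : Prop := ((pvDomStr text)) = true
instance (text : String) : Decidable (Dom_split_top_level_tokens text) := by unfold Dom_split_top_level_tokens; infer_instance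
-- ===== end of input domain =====

-- B replaces A's single for-loop boolean-flag state machine by an outer token loop with
-- dedicated inner loops for one token and for one quoted string (objective: alternative).


-- ===== PORT A =====
-- one step of A's for-loop over the characters; state = (tokens, current, depth, in_string, escape)
def stepA (st : List (List Char) × List Char × Int × Bool × Bool) (c : Char) :
    List (List Char) × List Char × Int × Bool × Bool :=
  match st with
  | (tokens, cur, depth, instr, esc) =>
    if instr then
      let cur := cur ++ [c]
      if esc then (tokens, cur, depth, true, false)
      else if c = '\\' then (tokens, cur, depth, true, true)
      else if c = '"' then (tokens, cur, depth, false, esc)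
      else (tokens, cur, depth, true, esc)
    else if c = '"' then (tokens, cur ++ [c], depth, true, esc)
    else if c = '(' then (tokens, cur ++ [c], depth + 1, instr, esc)
    else if c = ')' then (tokens, cur ++ [c], depth - 1, instr, esc)
    else if PySem.Chars.isspace c = true ∧ depth = 0 then
      (if cur ≠ [] then tokens ++ [PySem.Chars.strip cur] else tokens, [], depth, instr, esc)
    else (tokens, cur ++ [c], depth, instr, esc)

-- A's final flush and `[token for token in tokens if token]`
def finishA (tokens : List (List Char)) (cur : List Char) : List String :=
  ((if cur ≠ [] then tokens ++ [PySem.Chars.strip cur] else tokens).filter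
      (fun t => t ≠ [])).map String.ofList

def split_top_level_tokens (text : String) : List String :=
  let st := text.toList.foldl stepA ([], [], 0, false, false)
  finishA st.1 st.2.1

-- ===== PORT B =====
-- Source B's innermost while loop: consume a quoted string (escape-aware); returns (buf, rest)
def consumeStr : List Char → Bool → List Char → List Char × List Char
  | [], _, buf => (buf, [])
  | ch :: rest, esc, buf =>
    if esc then consumeStr rest false (buf ++ [ch])
    else if ch = '\\' then consumeStr rest true (buf ++ [ch])
    else if ch = '"' then (buf ++ [ch], rest)
    else consumeStr rest false (buf ++ [ch])

-- Source B's middle while loop: build one token; returns (buf, depth, rest).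
-- fuel ≥ length of the list makes the recursion structural; the 0-case is never reached then.
def buildTok : Nat → List Char → Int → List Char → List Char × Int × List Char
  | _, [], depth, buf => (buf, depth, [])
  | 0, cs, depth, buf => (buf, depth, cs)
  | fuel + 1, c :: rest, depth, buf =>
    if c = '"' then
      buildTok fuel (consumeStr rest false (buf ++ [c])).2 depth (consumeStr rest false (buf ++ [c])).1
    else if c = '(' then buildTok fuel rest (depth + 1) (buf ++ [c])
    else if c = ')' then buildTok fuel rest (depth - 1) (buf ++ [c])
    else if PySem.Chars.isspace c = true ∧ depth = 0 then (buf, depth, rest)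
    else buildTok fuel rest depth (buf ++ [c])

-- Source B's outer while loop: skip top-level whitespace, build one token, emit it if nonempty
def outerB : Nat → List Char → Int → List String
  | _, [], _ => []
  | 0, _, _ => []
  | fuel + 1, c :: rest, depth =>
    if PySem.Chars.isspace c = true ∧ depth = 0 then outerB fuel rest depth
    else
      let r := buildTok (c :: rest).length (c :: rest) depth []
      (if PySem.Chars.strip r.1 ≠ [] then [String.ofList (PySem.Chars.strip r.1)] else []) ++
        outerB fuel r.2.2 r.2.1

def split_top_level_tokens_alt (text : String) : List String :=
  outerB text.toList.length text.toList 0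

-- ===== PRECONDITION & SPEC =====
def Spec_split_top_level_tokens (text : String) (out : List String) : Prop := out = split_top_level_tokens_alt text
instance (text : String) (out : List String) : Decidable (Spec_split_top_level_tokens text out) := by unfold Spec_split_top_level_tokens; infer_instance

-- ===== CLAIM (what is proved, stated in full; the proofs are below) =====
def Claim_equal_split_top_level_tokens : Prop := ∀ (text : String), Dom_split_top_level_tokens text → Spec_split_top_level_tokens text (split_top_level_tokens text)

-- ===== LEMMAS AND PROOFS =====

-- buildTok/outerB applied with exactly enough fuel
def buildTokW (cs : List Char) (d : Int) (buf : List Char) : List Char × Int × List Char :=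
  buildTok cs.length cs d buf

def outerBW (cs : List Char) (d : Int) : List String :=
  outerB cs.length cs d

theorem consumeStr_rest_le (cs : List Char) : ∀ e buf, (consumeStr cs e buf).2.length ≤ cs.length := by
  induction cs with
  | nil => intro e buf; simp [consumeStr]
  | cons c rest ih =>
    intro e buf
    simp only [consumeStr]
    split_ifs <;> first
      | (exact le_trans (ih _ _) (Nat.le_succ _))
      | simp

theorem buildTok_rest_le (f : Nat) : ∀ (cs : List Char) (d : Int) (buf : List Char),
    (buildTok f cs d buf).2.2.length ≤ cs.length := by
  induction f with
  | zero => intro cs d buf; cases cs <;> simp [buildTok]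
  | succ fuel ih =>
    intro cs d buf
    cases cs with
    | nil => simp [buildTok]
    | cons c rest =>
      rw [buildTok]
      split_ifs
      · exact le_trans (ih _ _ _)
          (le_trans (consumeStr_rest_le rest false (buf ++ [c])) (Nat.le_succ _))
      · exact le_trans (ih _ _ _) (Nat.le_succ _)
      · exact le_trans (ih _ _ _) (Nat.le_succ _)
      · exact Nat.le_succ _
      · exact le_trans (ih _ _ _) (Nat.le_succ _)

theorem buildTok_cons_rest_le (f : Nat) (c : Char) (rest : List Char) (d : Int) (buf : List Char) :
    (buildTok (f + 1) (c :: rest) d buf).2.2.length ≤ rest.length := by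
  rw [buildTok]
  split_ifs
  · exact le_trans (buildTok_rest_le _ _ _ _) (consumeStr_rest_le rest false (buf ++ [c]))
  · exact buildTok_rest_le _ _ _ _
  · exact buildTok_rest_le _ _ _ _
  · exact Nat.le_refl _
  · exact buildTok_rest_le _ _ _ _

theorem buildTok_fuel (f : Nat) : ∀ (g : Nat) (cs : List Char) (d : Int) (buf : List Char),
    cs.length ≤ f → cs.length ≤ g → buildTok f cs d buf = buildTok g cs d buf := by
  induction f with
  | zero =>
    intro g cs d buf hf _
    have : cs = [] := List.eq_nil_of_length_eq_zero (Nat.le_zero.mp hf)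
    subst this
    cases g <;> simp [buildTok]
  | succ fuel ih =>
    intro g cs d buf hf hg
    cases cs with
    | nil => cases g <;> simp [buildTok]
    | cons c rest =>
      cases g with
      | zero => simp at hg
      | succ g' =>
        rw [buildTok, buildTok]
        simp only [List.length_cons] at hf hg
        have hf' : rest.length ≤ fuel := Nat.lt_succ_iff.mp hf
        have hg' : rest.length ≤ g' := Nat.lt_succ_iff.mp hg
        split_ifs
        · exact ih g' _ d _
            (le_trans (consumeStr_rest_le rest false (buf ++ [c])) hf')
            (le_trans (consumeStr_rest_le rest false (buf ++ [c])) hg')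
        · exact ih g' _ _ _ hf' hg'
        · exact ih g' _ _ _ hf' hg'
        · rfl
        · exact ih g' _ _ _ hf' hg'

theorem outerB_fuel (f : Nat) : ∀ (g : Nat) (cs : List Char) (d : Int),
    cs.length ≤ f → cs.length ≤ g → outerB f cs d = outerB g cs d := by
  induction f with
  | zero =>
    intro g cs d hf _
    have : cs = [] := List.eq_nil_of_length_eq_zero (Nat.le_zero.mp hf)
    subst this
    cases g <;> simp [outerB]
  | succ fuel ih =>
    intro g cs d hf hg
    cases cs with
    | nil => cases g <;> simp [outerB]
    | cons c rest =>
      cases g with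
      | zero => simp at hg
      | succ g' =>
        rw [outerB, outerB]
        simp only [List.length_cons] at hf hg
        have hf' : rest.length ≤ fuel := Nat.lt_succ_iff.mp hf
        have hg' : rest.length ≤ g' := Nat.lt_succ_iff.mp hg
        split_ifs
        · exact ih g' rest d hf' hg'
        · simp only [List.length_cons]
          have hb := buildTok_cons_rest_le rest.length c rest d []
          rw [ih g' _ _ (le_trans hb hf') (le_trans hb hg')]

theorem buildTokW_cons (c : Char) (rest : List Char) (d : Int) (buf : List Char) :
    buildTokW (c :: rest) d buf =
      if c = '"' then
        buildTokW (consumeStr rest false (buf ++ [c])).2 d (consumeStr rest false (buf ++ [c])).1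
      else if c = '(' then buildTokW rest (d + 1) (buf ++ [c])
      else if c = ')' then buildTokW rest (d - 1) (buf ++ [c])
      else if PySem.Chars.isspace c = true ∧ d = 0 then (buf, d, rest)
      else buildTokW rest d (buf ++ [c]) := by
  show buildTok (rest.length + 1) (c :: rest) d buf = _
  rw [buildTok]
  split_ifs
  · exact buildTok_fuel rest.length _ _ _ _
      (consumeStr_rest_le rest false (buf ++ [c])) (Nat.le_refl _)
  · rfl
  · rfl
  · rfl
  · rfl

theorem outerBW_cons (c : Char) (rest : List Char) (d : Int) :
    outerBW (c :: rest) d =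
      if PySem.Chars.isspace c = true ∧ d = 0 then outerBW rest d
      else
        (if PySem.Chars.strip (buildTokW (c :: rest) d []).1 ≠ [] then
            [String.ofList (PySem.Chars.strip (buildTokW (c :: rest) d []).1)]
          else []) ++
          outerBW (buildTokW (c :: rest) d []).2.2 (buildTokW (c :: rest) d []).2.1 := by
  show outerB (rest.length + 1) (c :: rest) d = _
  rw [outerB]
  by_cases hw : PySem.Chars.isspace c = true ∧ d = 0
  · rw [if_pos hw, if_pos hw]
    rfl
  · rw [if_neg hw, if_neg hw]
    simp only [List.length_cons]
    have hb := buildTok_cons_rest_le rest.length c rest d []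
    rw [outerB_fuel rest.length _ _ _ hb (Nat.le_refl _)]
    rfl

-- the token(s) A/B emit for a finished buffer
def emitTok (buf : List Char) : List String :=
  if PySem.Chars.strip buf ≠ [] then [String.ofList (PySem.Chars.strip buf)] else []

-- B's view of A's mid-run state: empty buffer = between tokens, else mid-token
def middleB (cs : List Char) (d : Int) (cur : List Char) : List String :=
  if cur = [] then outerBW cs d
  else
    emitTok (buildTokW cs d cur).1 ++ outerBW (buildTokW cs d cur).2.2 (buildTokW cs d cur).2.1

theorem middleB_ne (cs : List Char) (d : Int) (cur : List Char) (h : cur ≠ []) :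
    middleB cs d cur =
      emitTok (buildTokW cs d cur).1 ++ outerBW (buildTokW cs d cur).2.2 (buildTokW cs d cur).2.1 := by
  simp [middleB, h]

theorem consumeStr_acc_ne (cs : List Char) : ∀ e buf, buf ≠ [] → (consumeStr cs e buf).1 ≠ [] := by
  induction cs with
  | nil => intro e buf h; simpa [consumeStr] using h
  | cons c rest ih =>
    intro e buf h
    simp only [consumeStr]
    split_ifs <;> first
      | (exact ih _ _ (by simp))
      | simp

def finSt (st : List (List Char) × List Char × Int × Bool × Bool) : List String :=
  finishA st.1 st.2.1

-- A's in-string run is B's consumeStr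
theorem string_run (cs : List Char) : ∀ e cur tokens d,
    finSt (cs.foldl stepA (tokens, cur, d, true, e)) =
      finSt ((consumeStr cs e cur).2.foldl stepA (tokens, (consumeStr cs e cur).1, d, false, false)) := by
  induction cs with
  | nil => intro e cur tokens d; rfl
  | cons c rest ih =>
    intro e cur tokens d
    rw [List.foldl_cons]
    cases e with
    | true =>
      rw [show stepA (tokens, cur, d, true, true) c = (tokens, cur ++ [c], d, true, false)
            from by simp [stepA]]
      rw [show consumeStr (c :: rest) true cur = consumeStr rest false (cur ++ [c])
            from by rw [consumeStr]; simp]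
      exact ih false (cur ++ [c]) tokens d
    | false =>
      by_cases h2 : c = '\\'
      · subst h2
        rw [show stepA (tokens, cur, d, true, false) '\\' = (tokens, cur ++ ['\\'], d, true, true)
              from by simp [stepA]]
        rw [show consumeStr ('\\' :: rest) false cur = consumeStr rest true (cur ++ ['\\'])
              from by rw [consumeStr]; simp]
        exact ih true (cur ++ ['\\']) tokens d
      · by_cases h3 : c = '"'
        · subst h3
          rw [show stepA (tokens, cur, d, true, false) '"' = (tokens, cur ++ ['"'], d, false, false)
                from by simp [stepA]]
          rw [show consumeStr ('"' :: rest) false cur = (cur ++ ['"'], rest)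
                from by rw [consumeStr]; simp]
        · rw [show stepA (tokens, cur, d, true, false) c = (tokens, cur ++ [c], d, true, false)
                from by simp [stepA, h2, h3]]
          rw [show consumeStr (c :: rest) false cur = consumeStr rest false (cur ++ [c])
                from by rw [consumeStr]; simp [h2, h3]]
          exact ih false (cur ++ [c]) tokens d

-- stepping into a token / over a string keeps middleB fixed
theorem middleB_step (c : Char) (cs cs' : List Char) (d d' : Int) (cur buf' : List Char)
    (hns : ¬(PySem.Chars.isspace c = true ∧ d = 0))
    (hbt : buildTokW (c :: cs) d cur = buildTokW cs' d' buf') (hb : buf' ≠ []) :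
    middleB (c :: cs) d cur = middleB cs' d' buf' := by
  rw [middleB_ne _ _ _ hb, ← hbt]
  by_cases hc : cur = []
  · subst hc
    simp [middleB]
    rw [outerBW_cons, if_neg hns]
    simp [emitTok]
  · rw [middleB_ne _ _ _ hc]

theorem main_nil (tokens : List (List Char)) (cur : List Char) (d : Int) :
    finSt (tokens, cur, d, false, false) =
      (tokens.filter (fun t => t ≠ [])).map String.ofList ++ middleB [] d cur := by
  by_cases hc : cur = []
  · subst hc
    simp [finSt, finishA, middleB, outerBW, outerB]
  · simp only [finSt, finishA, if_pos hc, middleB, if_neg hc, buildTokW, buildTok, emitTok]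
    rw [List.filter_append, List.map_append]
    congr 1
    by_cases hs : PySem.Chars.strip cur = [] <;> simp [hs, outerBW, outerB]

theorem main_run (n : Nat) : ∀ (cs : List Char), cs.length ≤ n → ∀ tokens cur d,
    finSt (cs.foldl stepA (tokens, cur, d, false, false)) =
      (tokens.filter (fun t => t ≠ [])).map String.ofList ++ middleB cs d cur := by
  induction n with
  | zero =>
    intro cs hcs tokens cur d
    have hnil : cs = [] := List.eq_nil_of_length_eq_zero (Nat.le_zero.mp hcs)
    subst hnil
    exact main_nil tokens cur d
  | succ m ih =>
    intro cs hcs tokens cur d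
    cases cs with
    | nil => exact main_nil tokens cur d
    | cons c rest =>
      have hr : rest.length ≤ m := by simp only [List.length_cons] at hcs; omega
      simp only [List.foldl_cons]
      by_cases h1 : c = '"'
      · subst h1
        rw [show stepA (tokens, cur, d, false, false) '"' = (tokens, cur ++ ['"'], d, true, false)
              from by simp [stepA]]
        rw [string_run]
        have hb : (consumeStr rest false (cur ++ ['"'])).1 ≠ [] :=
          consumeStr_acc_ne _ _ _ (by simp)
        rw [ih _ (le_trans (consumeStr_rest_le rest false _) hr)]
        rw [middleB_step '"' rest (consumeStr rest false (cur ++ ['"'])).2 d d cur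
              (consumeStr rest false (cur ++ ['"'])).1
              (by rintro ⟨h, -⟩; exact absurd h (by decide)) (by rw [buildTokW_cons]; simp) hb]
      · by_cases h2 : c = '('
        · subst h2
          rw [show stepA (tokens, cur, d, false, false) '(' = (tokens, cur ++ ['('], d + 1, false, false)
                from by simp [stepA]]
          rw [ih _ hr]
          rw [middleB_step '(' rest rest d (d + 1) cur (cur ++ ['('])
                (by rintro ⟨h, -⟩; exact absurd h (by decide)) (by rw [buildTokW_cons]; simp) (by simp)]
        · by_cases h3 : c = ')'
          · subst h3
            rw [show stepA (tokens, cur, d, false, false) ')' = (tokens, cur ++ [')'], d - 1, false, false)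
                  from by simp [stepA]]
            rw [ih _ hr]
            rw [middleB_step ')' rest rest d (d - 1) cur (cur ++ [')'])
                  (by rintro ⟨h, -⟩; exact absurd h (by decide)) (by rw [buildTokW_cons]; simp) (by simp)]
          · by_cases h4 : PySem.Chars.isspace c = true ∧ d = 0
            · rw [show stepA (tokens, cur, d, false, false) c =
                    (if cur ≠ [] then tokens ++ [PySem.Chars.strip cur] else tokens, [], d, false, false)
                    from by simp [stepA, h1, h2, h3, h4]]
              rw [ih _ hr]
              by_cases hc : cur = []
              · subst hc
                simp only [ne_eq, not_true_eq_false, if_false]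
                have hm : middleB (c :: rest) d [] = outerBW (c :: rest) d := by simp [middleB]
                have hm2 : middleB rest d [] = outerBW rest d := by simp [middleB]
                rw [hm2, hm, outerBW_cons, if_pos h4]
              · simp only [if_pos hc, List.filter_append, List.map_append]
                rw [middleB_ne _ _ _ hc,
                    show buildTokW (c :: rest) d cur = (cur, d, rest)
                      from by rw [buildTokW_cons]; simp [h1, h2, h3, h4.1, h4.2]]
                simp only [middleB, List.append_assoc]
                congr 1
                by_cases hs : PySem.Chars.strip cur = [] <;> simp [emitTok, hs]
            · rw [show stepA (tokens, cur, d, false, false) c = (tokens, cur ++ [c], d, false, false)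
                    from by simp [stepA, h1, h2, h3, h4]]
              rw [ih _ hr]
              rw [middleB_step c rest rest d d cur (cur ++ [c]) h4
                    (by rw [buildTokW_cons]; simp [h1, h2, h3, h4]) (by simp)]

-- ===== VERDICT (by name: the statement is the Claim_ definition above) =====
theorem split_top_level_tokens_spec : Claim_equal_split_top_level_tokens := by
  intro text _
  unfold Spec_split_top_level_tokens split_top_level_tokens split_top_level_tokens_alt
  have h := main_run text.toList.length text.toList le_rfl [] [] 0
  simpa [finSt, middleB, outerBW] using h
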